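-- pv_equiv track=rewrite | github.com/stellariumImpl/fuzzy-rag-adventure | backend/app.py | _merge_dict_with_defaults
-- ===== SOURCE A (Python) =====
-- from typing import Any
--
-- def _merge_dict_with_defaults(defaults: dict[str, Any], current: Any) -> dict[str, Any]:
--     merged = dict(defaults)
--     if not isinstance(current, dict):
--         return merged
--     for key, value in current.items():
--         if key in merged:
--             merged[key] = value
--     return merged
-- ===== SOURCE B (Python) =====
-- from typing import Any
--
-- def _merge_dict_with_defaults(defaults: dict[str, Any], current: Any) -> dict[str, Any]:
--     if not isinstance(current, dict):
--         return dict(defaults)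
--     return {k: current.get(k, v) for k, v in defaults.items()}
-- ===== Notes on version B (the rewrite author's own statement) =====
-- stated objective: simpler
-- what changed: B is one comprehension driven from defaults.items(), looking each key up in current with current.get(k, v); A copies defaults and then mutates the copy by a loop over current.items() guarded by a membership test. The lookup direction and the traversed collection are inverted.
import Mathlib
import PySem

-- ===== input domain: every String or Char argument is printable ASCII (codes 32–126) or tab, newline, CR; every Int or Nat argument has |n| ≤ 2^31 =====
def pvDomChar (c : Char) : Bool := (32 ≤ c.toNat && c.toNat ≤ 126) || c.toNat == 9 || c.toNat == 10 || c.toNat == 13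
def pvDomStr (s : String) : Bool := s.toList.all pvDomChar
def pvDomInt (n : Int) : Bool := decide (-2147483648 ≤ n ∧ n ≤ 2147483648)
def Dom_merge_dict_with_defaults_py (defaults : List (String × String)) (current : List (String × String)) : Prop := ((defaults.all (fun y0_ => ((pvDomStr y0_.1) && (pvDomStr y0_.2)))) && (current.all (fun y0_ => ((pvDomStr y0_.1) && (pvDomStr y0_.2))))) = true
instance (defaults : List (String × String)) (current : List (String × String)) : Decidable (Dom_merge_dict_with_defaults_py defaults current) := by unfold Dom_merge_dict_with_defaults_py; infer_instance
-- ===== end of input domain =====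

-- B replaces A's copy-then-mutate loop over current by one pass driven from defaults that looks
-- each key up in current; chosen for simplicity. Under the type convention both dict arguments
-- arrive as association lists, so 'isinstance(current, dict)' is always true and the non-dict
-- early return of both Pythons is unreachable here.

-- ===== PORT A =====
-- merged = dict(defaults); for key, value in current.items(): if key in merged: merged[key] = value
def merge_dict_with_defaults_py (defaults : List (String × String)) (current : List (String × String)) : List (String × String) :=
  let merged := PySem.Dict.ofList defaults
  let cur := PySem.Dict.ofList current
  (cur.items.foldl (fun m kv => if m.contains kv.1 then m.insert kv.1 kv.2 else m) merged).items

-- ===== PORT B =====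
-- {k: current.get(k, v) for k, v in defaults.items()} — the comprehension's source keys are the
-- keys of a dict, hence pairwise distinct, so each insertion is of a fresh key: building the
-- result dict is EXACTLY producing one output pair per input pair in order, ported as the
-- structural recursion altBuild below (exact here).
def altBuild (c : PySem.Dict String String) : List (String × String) → List (String × String)
  | [] => []
  | (k, v) :: rest => (k, c.getD k v) :: altBuild c rest

def merge_dict_with_defaults_py_alt (defaults : List (String × String)) (current : List (String × String)) : List (String × String) :=
  altBuild (PySem.Dict.ofList current) (PySem.Dict.ofList defaults).items

-- ===== PRECONDITION & SPEC =====
def Spec_merge_dict_with_defaults_py (defaults : List (String × String)) (current : List (String × String)) (out : List (String × String)) : Prop := out = merge_dict_with_defaults_py_alt defaults current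
instance (defaults : List (String × String)) (current : List (String × String)) (out : List (String × String)) : Decidable (Spec_merge_dict_with_defaults_py defaults current out) := by unfold Spec_merge_dict_with_defaults_py; infer_instance

-- ===== CLAIM (what is proved, stated in full; the proofs are below) =====
def Claim_equal_merge_dict_with_defaults_py : Prop := ∀ (defaults : List (String × String)) (current : List (String × String)), Dom_merge_dict_with_defaults_py defaults current → Spec_merge_dict_with_defaults_py defaults current (merge_dict_with_defaults_py defaults current)

-- ===== LEMMAS AND PROOFS =====

-- B's pass written as a map.
lemma altBuild_eq_map (c : PySem.Dict String String) (l : List (String × String)) :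
    altBuild c l = l.map (fun kv => (kv.1, c.getD kv.1 kv.2)) := by
  induction l with
  | nil => rfl
  | cons q t ih => cases q; simp [altBuild, ih]

-- A's loop: updating existing keys rewrites each item by the first match found in l.
lemma loopA_items :
    ∀ (l : List (String × String)) (m : PySem.Dict String String),
      (l.map (fun p => p.1)).Nodup →
      (l.foldl (fun m kv => if m.contains kv.1 then m.insert kv.1 kv.2 else m) m).items
        = m.items.map (fun p =>
            match l.find? (fun q => q.1 == p.1) with
            | some q => (p.1, q.2)
            | none => p) := by
  intro l
  induction l with
  | nil => intro m _; simp
  | cons q t ih =>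
    intro m hnd
    simp only [List.map_cons, List.nodup_cons] at hnd
    have hqt : ∀ r ∈ t, (q.1 == r.1) = false := by
      intro r hr
      simp only [beq_eq_false_iff_ne, ne_eq]
      intro h; exact hnd.1 (List.mem_map.mpr ⟨r, hr, h.symm⟩)
    simp only [List.foldl_cons]
    by_cases hc : m.contains q.1
    · rw [if_pos hc, ih _ hnd.2,
        PySem.Dict.items_insert_of_contains m q.2 hc, List.map_map]
      apply List.map_congr_left
      intro p _
      by_cases hpq : (p.1 == q.1) = true
      · have hpq' : p.1 = q.1 := eq_of_beq hpq
        simp only [Function.comp, hpq, if_pos]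
        have hfind : t.find? (fun r => r.1 == q.1) = none := by
          rw [List.find?_eq_none]
          intro r hr
          have := hqt r hr
          simp only [beq_eq_false_iff_ne, ne_eq] at this
          simp only [beq_iff_eq]
          exact fun h => this h.symm
        simp [hpq', hfind]
      · simp only [Function.comp, hpq, if_neg, Bool.not_eq_true]
        have : (q.1 == p.1) = false := by
          simp only [beq_eq_false_iff_ne, ne_eq] at hpq ⊢
          simp only [beq_iff_eq] at hpq
          exact fun h => hpq h.symm
        simp [this]
    · rw [if_neg hc, ih _ hnd.2]
      apply List.map_congr_left
      intro p hp
      have : (q.1 == p.1) = false := by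
        simp only [PySem.Dict.contains, List.any_eq_true, not_exists] at hc
        push Not at hc
        have := hc p hp
        simp only [beq_eq_false_iff_ne, ne_eq] at this ⊢
        simp only [beq_iff_eq] at this
        exact fun h => this h.symm
      simp [this]

-- find?-over-items is get?/getD.
lemma find?_items_getD (c : PySem.Dict String String) (p : String × String) :
    (match c.items.find? (fun q => q.1 == p.1) with
      | some q => (p.1, q.2)
      | none => p) = (p.1, c.getD p.1 p.2) := by
  cases p with
  | mk k v =>
    simp only [PySem.Dict.getD, PySem.Dict.get?]
    cases h : c.items.find? (fun q => q.1 == k) <;> simp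

-- ===== VERDICT (by name: the statement is the Claim_ definition above) =====
theorem merge_dict_with_defaults_py_spec : Claim_equal_merge_dict_with_defaults_py := by
  intro defaults current _
  unfold Spec_merge_dict_with_defaults_py merge_dict_with_defaults_py merge_dict_with_defaults_py_alt
  set d := PySem.Dict.ofList defaults with hd
  set c := PySem.Dict.ofList current with hc
  have hcnd : (c.items.map (fun p => p.1)).Nodup := by
    simpa [PySem.Dict.keys] using PySem.Dict.nodup_keys_ofList (ν := String) current
  rw [loopA_items c.items d hcnd, altBuild_eq_map]
  apply List.map_congr_left
  intro p _
  exact find?_items_getD c p
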